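-- pv_equiv track=rewrite | github.com/RafalKLab/phone-catalog | scraper/main.py | extract_storage_from_tokens
-- ===== SOURCE A (Python) =====
-- from typing import Optional, Dict, List, Tuple
--
-- def extract_storage_from_tokens(tokens: List[str]) -> Tuple[str, List[str]]:
--     """
--     Extracts the first token containing 'GB' (case-insensitive) as storage capacity.
--     Removes it from the token list.
--     """
--     storage = "Unknown"
--     new_tokens = []
--
--     for token in tokens:
--         if storage == "Unknown" and "gb" in token.lower():
--             storage = token.upper()
--         else:
--             new_tokens.append(token)
--
--     return storage, new_tokens
-- ===== SOURCE B (Python) =====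
-- from typing import List, Tuple
--
-- def extract_storage_from_tokens(tokens: List[str]) -> Tuple[str, List[str]]:
--     idx = next((i for i, t in enumerate(tokens) if "gb" in t.lower()), None)
--     if idx is None:
--         return "Unknown", list(tokens)
--     return tokens[idx].upper(), tokens[:idx] + tokens[idx + 1:]
-- ===== Notes on version B (the rewrite author's own statement) =====
-- stated objective: alternative
-- what changed: Replaces A's flag-guarded single-pass filter (state machine carrying storage + accumulator) with a two-phase locate-then-slice: find the index of the first 'gb' token, then build the result by slicing around it.
import Mathlib
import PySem

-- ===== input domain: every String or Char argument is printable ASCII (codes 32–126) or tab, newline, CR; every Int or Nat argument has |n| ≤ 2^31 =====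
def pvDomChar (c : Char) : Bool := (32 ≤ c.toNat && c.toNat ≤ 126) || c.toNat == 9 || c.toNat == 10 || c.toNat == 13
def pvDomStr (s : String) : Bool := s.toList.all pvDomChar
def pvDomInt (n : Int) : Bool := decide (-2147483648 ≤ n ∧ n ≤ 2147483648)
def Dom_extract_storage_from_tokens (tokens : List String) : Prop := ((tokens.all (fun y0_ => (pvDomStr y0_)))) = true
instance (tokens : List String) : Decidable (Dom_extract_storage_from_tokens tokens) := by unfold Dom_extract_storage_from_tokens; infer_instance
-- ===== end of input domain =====

-- B replaces A's flag-guarded single-pass filter with a locate-then-slice two-phase construction (same cost, different decomposition).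

-- ===== PORT A =====
-- loop body of A: carries (storage, new_tokens) through the for-loop
def pvStepA (st : String × List String) (token : String) : String × List String :=
  if st.1 == "Unknown" && PySem.Str.isIn "gb" (PySem.Str.lower token) then
    (PySem.Str.upper token, st.2)
  else
    (st.1, st.2 ++ [token])

def extract_storage_from_tokens (tokens : List String) : String × List String :=
  tokens.foldl pvStepA ("Unknown", [])

-- ===== PORT B =====
-- next((i for i, t in enumerate(tokens) if "gb" in t.lower()), None) → List.findIdx?;
-- tokens[:i] + tokens[i+1:] for the in-range index i is exactly take i ++ drop (i+1)
def extract_storage_from_tokens_alt (tokens : List String) : String × List String :=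
  match tokens.findIdx? (fun t => PySem.Str.isIn "gb" (PySem.Str.lower t)) with
  | none => ("Unknown", tokens)
  | some i => (PySem.Str.upper (tokens.getD i ""), tokens.take i ++ tokens.drop (i + 1))

-- ===== PRECONDITION & SPEC =====
def Spec_extract_storage_from_tokens (tokens : List String) (out : String × List String) : Prop := out = extract_storage_from_tokens_alt tokens
instance (tokens : List String) (out : String × List String) : Decidable (Spec_extract_storage_from_tokens tokens out) := by unfold Spec_extract_storage_from_tokens; infer_instance

-- ===== CLAIM (what is proved, stated in full; the proofs are below) =====
def Claim_equal_extract_storage_from_tokens : Prop := ∀ (tokens : List String), Dom_extract_storage_from_tokens tokens → Spec_extract_storage_from_tokens tokens (extract_storage_from_tokens tokens)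

-- ===== LEMMAS AND PROOFS =====

-- str.upper() never outputs a lowercase letter, so it can never equal "Unknown"
theorem pv_upperChar_ne_n (c : Char) : PySem.Chars.upperChar c ≠ 'n' := by
  unfold PySem.Chars.upperChar
  split_ifs with h
  · have hb : 'a' ≤ c ∧ c ≤ 'z' := by
      unfold PySem.Chars.islower at h; simpa using h
    have hlo : 97 ≤ c.toNat := hb.1
    have hhi : c.toNat ≤ 122 := hb.2
    intro hc
    have h2 : (Char.ofNat (c.toNat - 32)).toNat = 'n'.toNat := by rw [hc]
    rw [Char.toNat_ofNat] at h2
    rw [if_pos (show (c.toNat - 32).isValidChar by left; omega)] at h2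
    rw [show 'n'.toNat = 110 from rfl] at h2
    omega
  · intro hc
    subst hc
    exact h (by decide)

theorem pv_upper_ne_unknown (t : String) : (PySem.Str.upper t == "Unknown") = false := by
  rw [beq_eq_false_iff_ne]
  intro h
  have h1 : (PySem.Str.upper t).toList = "Unknown".toList := by rw [h]
  rw [PySem.Str.toList_upper] at h1
  unfold PySem.Chars.upper at h1
  have h2 : (t.toList.map PySem.Chars.upperChar)[1]? = "Unknown".toList[1]? := by rw [h1]
  rw [List.getElem?_map] at h2
  cases hg : t.toList[1]? with
  | none => simp [hg] at h2
  | some c =>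
    simp only [hg, Option.map_some] at h2
    have : PySem.Chars.upperChar c = 'n' := by
      have : "Unknown".toList[1]? = some 'n' := by decide
      rw [this] at h2; exact Option.some.inj h2
    exact pv_upperChar_ne_n c this

-- once storage is set (≠ "Unknown"), A just appends every remaining token
theorem pv_foldA_found (s : String) (hs : (s == "Unknown") = false)
    (rest : List String) (acc : List String) :
    rest.foldl pvStepA (s, acc) = (s, acc ++ rest) := by
  induction rest generalizing acc with
  | nil => simp
  | cons t ts ih =>
    simp only [List.foldl_cons, pvStepA, hs, Bool.false_and, Bool.false_eq_true, reduceIte]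
    rw [ih]
    simp

-- while storage is still "Unknown", A's fold matches B's find-then-slice
theorem pv_foldA_search (tokens : List String) (acc : List String) :
    tokens.foldl pvStepA ("Unknown", acc) =
      match tokens.findIdx? (fun t => PySem.Str.isIn "gb" (PySem.Str.lower t)) with
      | none => ("Unknown", acc ++ tokens)
      | some i => (PySem.Str.upper (tokens.getD i ""),
                   acc ++ (tokens.take i ++ tokens.drop (i + 1))) := by
  induction tokens generalizing acc with
  | nil => simp
  | cons t ts ih =>
    by_cases h : PySem.Str.isIn "gb" (PySem.Str.lower t) = true
    · simp only [List.foldl_cons, pvStepA, h, Bool.and_true, List.findIdx?_cons, BEq.refl,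
        if_pos trivial]
      rw [pv_foldA_found _ (pv_upper_ne_unknown t)]
      simp
    · have h' : (PySem.Str.isIn "gb" (PySem.Str.lower t)) = false := by
        simpa using h
      simp only [List.foldl_cons, pvStepA, h', Bool.and_false, Bool.false_eq_true, reduceIte,
        List.findIdx?_cons]
      rw [ih (acc ++ [t])]
      cases hf : ts.findIdx? (fun t => PySem.Str.isIn "gb" (PySem.Str.lower t)) with
      | none => simp
      | some j => simp [List.take_succ_cons, List.getD]

-- ===== VERDICT (by name: the statement is the Claim_ definition above) =====
theorem extract_storage_from_tokens_spec : Claim_equal_extract_storage_from_tokens := by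
  intro tokens _
  unfold Spec_extract_storage_from_tokens extract_storage_from_tokens extract_storage_from_tokens_alt
  rw [pv_foldA_search tokens []]
  cases hf : tokens.findIdx? (fun t => PySem.Str.isIn "gb" (PySem.Str.lower t)) <;> simp
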